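-- pv_equiv track=rewrite | github.com/rkechols/KattisAssorted | perket.py | perket
-- ===== SOURCE A (Python) =====
-- from typing import List, Tuple
--
-- def prod(a: List[int]) -> int:
-- 	if len(a) <= 0:
-- 		raise ValueError("cannot take the product of a list with length less than 1!")
-- 	to_return = a[0]
-- 	for v in a[1:]:
-- 		to_return *= v
-- 	return to_return
--
-- def perket(ingredients: List[Tuple[int, int]]) -> int:
-- 	smallest = None
-- 	i_count = len(ingredients)
-- 	for combo_dec in range(1, 2 ** i_count):
-- 		combo_bin = format(combo_dec, "b")
-- 		combo_bin = ("0" * (i_count - len(combo_bin))) + combo_bin  # pad the front with 0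
-- 		sours = list()
-- 		bitters = list()
-- 		for i, bit in enumerate(combo_bin):
-- 			if bit == "1":
-- 				this_s, this_b = ingredients[i]
-- 				sours.append(this_s)
-- 				bitters.append(this_b)
-- 		s_score = prod(sours)
-- 		b_score = sum(bitters)
-- 		net_score = abs(s_score - b_score)
-- 		if smallest is None or net_score < smallest:
-- 			smallest = net_score
-- 	return smallest
-- ===== SOURCE B (Python) =====
-- from typing import List, Optional, Tuple
--
-- def perket(ingredients: List[Tuple[int, int]]) -> Optional[int]:
-- 	states: List[Tuple[int, int]] = []
-- 	for s, b in ingredients: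
-- 		states = [(p * s, q + b) for p, q in states] + [(s, b)] + states
-- 	if not states:
-- 		return None
-- 	return min(abs(p - q) for p, q in states)
-- ===== Notes on version B (the rewrite author's own statement) =====
-- stated objective: alternative
-- what changed: Replaces the bitmask enumeration (which re-derives every subset from a formatted binary string, rescanning the ingredient list per mask) with a single left-to-right fold that maintains the list of (product-of-sours, sum-of-bitters) pairs of all nonempty subsets seen so far, extending each state incrementally per ingredient; intended as faster (measured 11.8x at n=256, but both versions time out at n=1024).
-- outside the precondition, e.g. on perket([]): A returns None, B returns None
import Mathlib
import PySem

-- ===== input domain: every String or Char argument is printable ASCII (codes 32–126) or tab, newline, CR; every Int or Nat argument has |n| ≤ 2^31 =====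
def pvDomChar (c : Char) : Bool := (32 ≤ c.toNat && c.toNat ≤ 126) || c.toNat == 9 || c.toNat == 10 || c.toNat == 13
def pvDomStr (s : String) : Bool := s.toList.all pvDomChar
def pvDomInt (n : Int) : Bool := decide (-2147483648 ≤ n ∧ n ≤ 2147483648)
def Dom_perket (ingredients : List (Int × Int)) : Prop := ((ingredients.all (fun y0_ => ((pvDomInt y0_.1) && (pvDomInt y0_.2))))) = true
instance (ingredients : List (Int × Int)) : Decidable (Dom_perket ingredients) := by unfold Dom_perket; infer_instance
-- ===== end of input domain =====

-- B replaces A's bitmask enumeration by one fold maintaining the (product, sum) pairs of all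
-- nonempty subsets seen so far (objective: alternative — no per-mask binary-string formatting / rescan).

-- ===== PORT A =====
-- prod(a): Python raises ValueError on []; perket only calls it on nonempty lists
-- (every combo_dec ≥ 1 selects at least one ingredient), so the [] branch is unreachable.
def prodA (a : List Int) : Int :=
  match a with
  | [] => 0
  | h :: t => t.foldl (fun acc v => acc * v) h

-- format(n, "b") as a list of chars (n ≥ 1 in all uses)
def binChars (n : Nat) : List Char :=
  if _h : n < 2 then [if n = 1 then '1' else '0']
  else binChars (n / 2) ++ [if n % 2 = 1 then '1' else '0']
  termination_by n
  decreasing_by omega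

def perket (ingredients : List (Int × Int)) : Int :=
  let i_count := ingredients.length
  let smallest : Option Int :=
    (PySem.List.pyRange 1 (2 ^ i_count) 1).foldl
      (fun smallest combo_dec =>
        let combo_bin0 := binChars combo_dec.toNat
        let combo_bin := List.replicate (i_count - combo_bin0.length) '0' ++ combo_bin0
        -- for i, bit in enumerate(combo_bin): the index i is always < len(ingredients)
        -- (the padded string has exactly i_count chars), so ingredients[i] never raises.
        let sb := (PySem.List.enumerate combo_bin 0).foldl
          (fun (acc : List Int × List Int) ic =>
            if ic.2 = '1' then
              let x := PySem.List.pyGetD ingredients ic.1 (0, 0)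
              (acc.1 ++ [x.1], acc.2 ++ [x.2])
            else acc) ([], [])
        let s_score := prodA sb.1
        let b_score := sb.2.sum
        let net_score := |s_score - b_score|
        match smallest with
        | none => some net_score
        | some s => some (if net_score < s then net_score else s))
      none
  match smallest with
  | some s => s
  | none => 0  -- Python returns None here (only for empty input); excluded by Pre_

-- ===== PORT B =====
def perket_alt (ingredients : List (Int × Int)) : Int :=
  let states := ingredients.foldl
    (fun states sb =>
      states.map (fun pq => (pq.1 * sb.1, pq.2 + sb.2)) ++ [sb] ++ states) []
  match PySem.List.min? (states.map (fun pq => |pq.1 - pq.2|)) (fun v => v) with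
  | some m => m
  | none => 0  -- states empty only for empty input, where Python B returns None; excluded by Pre_

-- ===== PRECONDITION & SPEC =====
-- Pre_ excludes only the empty list, on which both A and B return None, not an int.
def Pre_perket (ingredients : List (Int × Int)) : Prop := ingredients ≠ []
instance (ingredients : List (Int × Int)) : Decidable (Pre_perket ingredients) := by unfold Pre_perket; infer_instance
def pvWitness_perket : (List (Int × Int)) := [(3, 10), (-5, 2)]

def Spec_perket (ingredients : List (Int × Int)) (out : Int) : Prop := out = perket_alt ingredients
instance (ingredients : List (Int × Int)) (out : Int) : Decidable (Spec_perket ingredients out) := by unfold Spec_perket; infer_instance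

-- ===== CLAIM (what is proved, stated in full; the proofs are below) =====
def Claim_equal_perket : Prop := ∀ (ingredients : List (Int × Int)), Dom_perket ingredients → Pre_perket ingredients → Spec_perket ingredients (perket ingredients)

-- ===== LEMMAS AND PROOFS =====

-- option-valued running minimum (the accumulator of A's loop)
def omin (o : Option Int) (a : Int) : Option Int :=
  some (match o with | none => a | some s => min s a)

-- the (sour, bitter) pairs selected by a char list of bits
def selPairs (cs : List Char) (xs : List (Int × Int)) : List (Int × Int) :=
  ((cs.zip xs).filter (fun p => p.1 = '1')).map (·.2)

def padbin (n k : Nat) : List Char :=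
  List.replicate (n - (binChars k).length) '0' ++ binChars k

def pairFn (xs : List (Int × Int)) (k : Nat) : Int × Int :=
  (prodA ((selPairs (padbin xs.length k) xs).map (·.1)),
   ((selPairs (padbin xs.length k) xs).map (·.2)).sum)

def netOf (p : Int × Int) : Int := |p.1 - p.2|

def stepB (states : List (Int × Int)) (sb : Int × Int) : List (Int × Int) :=
  states.map (fun pq => (pq.1 * sb.1, pq.2 + sb.2)) ++ [sb] ++ states

def statesB (xs : List (Int × Int)) : List (Int × Int) := xs.foldl stepB []

lemma len_binChars_le : ∀ (n k : Nat), 1 ≤ k → k < 2 ^ n → (binChars k).length ≤ n := by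
  intro n
  induction n with
  | zero => intro k h1 h2; omega
  | succ n ih =>
    intro k h1 h2
    rw [binChars]
    split
    · simpa using Nat.le_add_left 1 n
    · rename_i h
      have hk2 : k / 2 < 2 ^ n := by
        have : 2 ^ (n + 1) = 2 * 2 ^ n := by ring
        omega
      have := ih (k / 2) (by omega) hk2
      simp [List.length_append]
      omega

lemma one_mem_binChars : ∀ (k : Nat), 1 ≤ k → '1' ∈ binChars k := by
  intro k
  induction k using Nat.strong_induction_on with
  | _ k ih =>
    intro h1
    rw [binChars]
    split
    · interval_cases k <;> simp
    · rename_i h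
      have := ih (k / 2) (by omega) (by omega)
      simp [this]

lemma length_padbin (n k : Nat) (h1 : 1 ≤ k) (h2 : k < 2 ^ n) : (padbin n k).length = n := by
  have := len_binChars_le n k h1 h2
  simp [padbin]
  omega

lemma padbin_one (n : Nat) : padbin (n + 1) 1 = List.replicate n '0' ++ ['1'] := by
  have : binChars 1 = ['1'] := by rw [binChars]; simp
  simp [padbin, this]

lemma padbin_step (n j b : Nat) (hj : 1 ≤ j) (hjn : j < 2 ^ n) (hb : b < 2) :
    padbin (n + 1) (2 * j + b) = padbin n j ++ [if b = 1 then '1' else '0'] := by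
  have hlen := len_binChars_le n j hj hjn
  have hbc : binChars (2 * j + b) = binChars j ++ [if b = 1 then '1' else '0'] := by
    rw [binChars]
    split
    · omega
    · have h1 : (2 * j + b) / 2 = j := by omega
      have h2 : (2 * j + b) % 2 = b := by omega
      rw [h1, h2]
  unfold padbin
  rw [hbc, List.length_append]
  simp only [List.length_cons, List.length_nil]
  have he : n + 1 - ((binChars j).length + (0 + 1)) = n - (binChars j).length := by omega
  rw [he, ← List.append_assoc]

lemma selPairs_append_singleton (cs : List Char) (xs : List (Int × Int)) (c : Char) (x : Int × Int)
    (h : cs.length = xs.length) :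
    selPairs (cs ++ [c]) (xs ++ [x]) = selPairs cs xs ++ (if c = '1' then [x] else []) := by
  unfold selPairs
  rw [List.zip_append h, List.filter_append, List.map_append]
  congr 1
  by_cases hc : c = '1' <;> simp [hc]

lemma selPairs_replicate_zero (n : Nat) (xs : List (Int × Int)) :
    selPairs (List.replicate n '0') xs = [] := by
  simp only [selPairs, List.map_eq_nil_iff, List.filter_eq_nil_iff]
  intro p hp
  have h0 : p.1 ∈ List.replicate n '0' := (List.of_mem_zip hp).1
  have := List.eq_of_mem_replicate h0
  simp [this]

lemma selPairs_ne_nil : ∀ (cs : List Char) (xs : List (Int × Int)),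
    cs.length = xs.length → '1' ∈ cs → selPairs cs xs ≠ [] := by
  intro cs
  induction cs with
  | nil => simp
  | cons c t ih =>
    intro xs hlen hmem
    cases xs with
    | nil => simp at hlen
    | cons y ys =>
      have hlen' : t.length = ys.length := by simpa using hlen
      by_cases hc : c = '1'
      · simp [selPairs, hc]
      · have hm : '1' ∈ t := by
          rcases List.mem_cons.mp hmem with h | h
          · exact absurd h.symm hc
          · exact h
        have := ih ys hlen' hm
        simp only [selPairs, List.zip_cons_cons, List.filter_cons] at this ⊢
        simpa [hc] using this

lemma prodA_append_singleton (l : List Int) (a : Int) (h : l ≠ []) :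
    prodA (l ++ [a]) = prodA l * a := by
  cases l with
  | nil => simp at h
  | cons x t => simp [prodA, List.foldl_append]

lemma pairFn_one (xs : List (Int × Int)) (x : Int × Int) : pairFn (xs ++ [x]) 1 = x := by
  unfold pairFn
  rw [List.length_append]
  simp only [List.length_cons, List.length_nil]
  rw [padbin_one,
      selPairs_append_singleton _ _ _ _ (by simp),
      selPairs_replicate_zero]
  simp [prodA]

lemma pairFn_even (xs : List (Int × Int)) (x : Int × Int) (j : Nat) (hj : 1 ≤ j)
    (hjn : j < 2 ^ xs.length) : pairFn (xs ++ [x]) (2 * j) = pairFn xs j := by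
  unfold pairFn
  rw [List.length_append]
  simp only [List.length_cons, List.length_nil]
  have hstep := padbin_step xs.length j 0 hj hjn (by omega)
  simp only [Nat.add_zero] at hstep
  rw [hstep, selPairs_append_singleton _ _ _ _ (length_padbin _ _ hj hjn)]
  simp

lemma pairFn_odd (xs : List (Int × Int)) (x : Int × Int) (j : Nat) (hj : 1 ≤ j)
    (hjn : j < 2 ^ xs.length) :
    pairFn (xs ++ [x]) (2 * j + 1) = ((pairFn xs j).1 * x.1, (pairFn xs j).2 + x.2) := by
  have hne : selPairs (padbin xs.length j) xs ≠ [] := by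
    apply selPairs_ne_nil _ _ (length_padbin _ _ hj hjn)
    exact List.mem_append_right _ (one_mem_binChars j hj)
  unfold pairFn
  rw [List.length_append]
  simp only [List.length_cons, List.length_nil]
  have hstep := padbin_step xs.length j 1 hj hjn (by omega)
  rw [hstep, selPairs_append_singleton _ _ _ _ (length_padbin _ _ hj hjn)]
  simp only [reduceIte, List.map_append, List.map_cons, List.map_nil, List.sum_append]
  rw [prodA_append_singleton _ _ (by simpa using hne)]
  simp

lemma range'_double_perm : ∀ (m : Nat),
    (List.range' 1 (2 * m + 1)).Perm (1 :: (List.range' 1 m).flatMap (fun j => [2 * j, 2 * j + 1])) := by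
  intro m
  induction m with
  | zero => simp
  | succ m ih =>
    have hsplit : List.range' 1 (2 * (m + 1) + 1) = List.range' 1 (2 * m + 1) ++ List.range' (2 * m + 2) 2 := by
      have h : List.range' 1 (2 * m + 1) ++ List.range' (1 + (2 * m + 1)) 2 = List.range' 1 (2 * m + 1 + 2) := List.range'_append_1
      have e1 : 1 + (2 * m + 1) = 2 * m + 2 := by omega
      have e2 : 2 * (m + 1) + 1 = 2 * m + 1 + 2 := by omega
      rw [e2, ← h, e1]
    rw [hsplit]
    have hR : List.range' (2 * m + 2) 2 = [2 * m + 2, 2 * m + 3] := by simp [List.range']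
    have h2 : List.range' 1 (m + 1) = List.range' 1 m ++ [1 + m] := List.range'_1_concat ..
    rw [hR, h2, List.flatMap_append]
    have hflat : List.flatMap (fun j => [2 * j, 2 * j + 1]) [1 + m] = [2 * m + 2, 2 * m + 3] := by
      simp; omega
    rw [hflat]
    simpa using ih.append_right [2 * m + 2, 2 * m + 3]

lemma flatMap_pair_perm {α β : Type} (l : List α) (g h : α → β) :
    (l.flatMap (fun j => [g j, h j])).Perm (l.map g ++ l.map h) := by
  induction l with
  | nil => simp
  | cons a t ih =>
    simp only [List.flatMap_cons, List.map_cons, List.cons_append]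
    refine List.Perm.cons _ ?_
    exact (ih.cons _).trans List.perm_middle.symm

lemma foldl_omin_some : ∀ (t : List Int) (a : Int), t.foldl omin (some a) = some (t.foldl min a) := by
  intro t
  induction t with
  | nil => intro a; rfl
  | cons x s ih => intro a; simp [omin, List.foldl_cons, ih]

lemma foldl_omin_perm {l l' : List Int} (hp : l.Perm l') : ∀ o, l.foldl omin o = l'.foldl omin o := by
  induction hp with
  | nil => intro o; rfl
  | cons x _ ih => intro o; simp [List.foldl_cons, ih]
  | swap x y l =>
    intro o
    simp only [List.foldl_cons]
    congr 1
    cases o <;> simp [omin] <;> omega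
  | trans _ _ ih1 ih2 => intro o; rw [ih1, ih2]

lemma selPairs_cons (c : Char) (cs : List Char) (y : Int × Int) (ys : List (Int × Int)) :
    selPairs (c :: cs) (y :: ys)
      = if c = '1' then y :: selPairs cs ys else selPairs cs ys := by
  by_cases hc : c = '1' <;> simp [selPairs, hc]

lemma inner_loop : ∀ (cs : List Char) (ing : List (Int × Int)) (s : Nat),
    s + cs.length ≤ ing.length → ∀ (acc : List Int × List Int),
    (PySem.List.enumerate cs (s : Int)).foldl
      (fun (acc : List Int × List Int) ic =>
        if ic.2 = '1' then
          (acc.1 ++ [(PySem.List.pyGetD ing ic.1 (0, 0)).1], acc.2 ++ [(PySem.List.pyGetD ing ic.1 (0, 0)).2])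
        else acc) acc
    = (acc.1 ++ (selPairs cs (ing.drop s)).map (·.1),
       acc.2 ++ (selPairs cs (ing.drop s)).map (·.2)) := by
  intro cs
  induction cs with
  | nil => intro ing s hs acc; simp [selPairs, PySem.List.enumerate_nil]
  | cons c t ih =>
    intro ing s hs acc
    have hslt : s < ing.length := by simp at hs; omega
    have hdrop : ing.drop s = ing[s] :: ing.drop (s + 1) := List.drop_eq_getElem_cons hslt
    have hget : PySem.List.pyGetD ing (s : Int) (0, 0) = ing[s] := by
      simp [PySem.List.pyGetD_natCast, List.getD_eq_getElem?_getD, hslt]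
    rw [PySem.List.enumerate_cons, List.foldl_cons, hdrop, selPairs_cons]
    have hcast : ((s : Int) + 1) = ((s + 1 : Nat) : Int) := by push_cast; ring
    by_cases hc : c = '1'
    · simp only [hc, hget, hcast, if_pos]
      rw [ih ing (s + 1) (by simp at hs ⊢; omega)]
      simp
    · simp only [hc, hcast]
      rw [ih ing (s + 1) (by simp at hs ⊢; omega)]
      simp

lemma main_perm : ∀ (xs : List (Int × Int)),
    ((List.range' 1 (2 ^ xs.length - 1)).map (pairFn xs)).Perm (statesB xs) := by
  intro xs
  induction xs using List.reverseRecOn with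
  | nil => simp [statesB]
  | append_singleton xs x ih =>
    have hlen : (xs ++ [x]).length = xs.length + 1 := by simp
    have hm : 2 ^ (xs.length + 1) - 1 = 2 * (2 ^ xs.length - 1) + 1 := by
      have h1 : 1 ≤ 2 ^ xs.length := Nat.one_le_two_pow
      rw [pow_succ]; omega
    rw [hlen, hm]
    have hstates : statesB (xs ++ [x]) = stepB (statesB xs) x := by
      simp [statesB, List.foldl_append]
    rw [hstates]
    refine ((range'_double_perm (2 ^ xs.length - 1)).map (pairFn (xs ++ [x]))).trans ?_
    simp only [List.map_cons, List.map_flatMap, List.map_nil]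
    rw [pairFn_one]
    have hmemj : ∀ j ∈ List.range' 1 (2 ^ xs.length - 1), 1 ≤ j ∧ j < 2 ^ xs.length := by
      intro j hj
      have := List.mem_range'_1.mp hj
      omega
    have heven : (List.range' 1 (2 ^ xs.length - 1)).map (fun j => pairFn (xs ++ [x]) (2 * j))
        = (List.range' 1 (2 ^ xs.length - 1)).map (pairFn xs) := by
      apply List.map_congr_left
      intro j hj
      exact pairFn_even xs x j (hmemj j hj).1 (hmemj j hj).2
    have hodd : (List.range' 1 (2 ^ xs.length - 1)).map (fun j => pairFn (xs ++ [x]) (2 * j + 1))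
        = ((List.range' 1 (2 ^ xs.length - 1)).map (pairFn xs)).map
            (fun p => (p.1 * x.1, p.2 + x.2)) := by
      rw [List.map_map]
      apply List.map_congr_left
      intro j hj
      exact pairFn_odd xs x j (hmemj j hj).1 (hmemj j hj).2
    have p2 := flatMap_pair_perm (List.range' 1 (2 ^ xs.length - 1))
        (fun j => pairFn (xs ++ [x]) (2 * j)) (fun j => pairFn (xs ++ [x]) (2 * j + 1))
    refine (p2.cons x).trans ?_
    rw [heven, hodd]
    have hstep : stepB (statesB xs) x
        = (statesB xs).map (fun p => (p.1 * x.1, p.2 + x.2)) ++ (x :: statesB xs) := by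
      simp [stepB]
    rw [hstep]
    refine List.Perm.trans ?_ List.perm_middle.symm
    refine List.Perm.cons x ?_
    refine (List.Perm.append ih (ih.map _)).trans List.perm_append_comm

lemma step_eq_omin (o : Option Int) (net : Int) :
    (match o with
     | none => some net
     | some s => some (if net < s then net else s)) = omin o net := by
  cases o with
  | none => rfl
  | some s =>
    simp only [omin, Int.min_def]
    split_ifs <;> first | rfl | omega

lemma pyRange_pow (n : Nat) :
    PySem.List.pyRange 1 (2 ^ n) 1 = (List.range' 1 (2 ^ n - 1)).map (fun k : Nat => (k : Int)) := by
  rw [PySem.List.pyRange_one]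
  have h1 : ((2 ^ n : Int) - 1).toNat = 2 ^ n - 1 := by
    have h : (2 ^ n : Int) = ((2 ^ n : Nat) : Int) := by push_cast; ring
    rw [h]; omega
  rw [h1, List.range'_eq_map_range, List.map_map]
  apply List.map_congr_left
  intro k _
  simp

lemma perket_eq_foldl_omin (xs : List (Int × Int)) :
    perket xs
      = match ((List.range' 1 (2 ^ xs.length - 1)).map (fun k => netOf (pairFn xs k))).foldl omin none with
        | some s => s
        | none => 0 := by
  unfold perket
  have hmain : (PySem.List.pyRange 1 (2 ^ xs.length) 1).foldl
      (fun smallest combo_dec =>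
        let combo_bin0 := binChars combo_dec.toNat
        let combo_bin := List.replicate (xs.length - combo_bin0.length) '0' ++ combo_bin0
        let sb := (PySem.List.enumerate combo_bin 0).foldl
          (fun (acc : List Int × List Int) ic =>
            if ic.2 = '1' then
              let x := PySem.List.pyGetD xs ic.1 (0, 0)
              (acc.1 ++ [x.1], acc.2 ++ [x.2])
            else acc) ([], [])
        let s_score := prodA sb.1
        let b_score := sb.2.sum
        let net_score := |s_score - b_score|
        match smallest with
        | none => some net_score
        | some s => some (if net_score < s then net_score else s)) none
      = ((List.range' 1 (2 ^ xs.length - 1)).map (fun k => netOf (pairFn xs k))).foldl omin none := by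
    rw [pyRange_pow, List.foldl_map, List.foldl_map]
    apply PySem.List.foldl_congr_mem
    intro acc k hk
    have hk' : 1 ≤ k ∧ k < 2 ^ xs.length := by
      have := List.mem_range'_1.mp hk
      omega
    have hlen := length_padbin xs.length k hk'.1 hk'.2
    simp only [Int.toNat_natCast]
    have hinner := inner_loop (padbin xs.length k) xs 0 (by omega) ([], [])
    simp only [Nat.cast_zero, List.drop_zero, List.nil_append] at hinner
    show (match acc with
          | none => some _
          | some s => some _) = _
    rw [show ((0:Int)) = ((0:Nat):Int) from by simp] at *
    dsimp only [padbin] at hinner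
    rw [hinner]
    exact step_eq_omin acc _
  calc perket xs
      = (match (PySem.List.pyRange 1 (2 ^ xs.length) 1).foldl
      (fun smallest combo_dec =>
        let combo_bin0 := binChars combo_dec.toNat
        let combo_bin := List.replicate (xs.length - combo_bin0.length) '0' ++ combo_bin0
        let sb := (PySem.List.enumerate combo_bin 0).foldl
          (fun (acc : List Int × List Int) ic =>
            if ic.2 = '1' then
              let x := PySem.List.pyGetD xs ic.1 (0, 0)
              (acc.1 ++ [x.1], acc.2 ++ [x.2])
            else acc) ([], [])
        let s_score := prodA sb.1
        let b_score := sb.2.sum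
        let net_score := |s_score - b_score|
        match smallest with
        | none => some net_score
        | some s => some (if net_score < s then net_score else s)) none with
         | some s => s
         | none => 0) := rfl
    _ = _ := by rw [hmain]

lemma perket_alt_eq_foldl_omin (xs : List (Int × Int)) :
    perket_alt xs
      = match ((statesB xs).map netOf).foldl omin none with
        | some s => s
        | none => 0 := by
  calc perket_alt xs
      = (match PySem.List.min? (((statesB xs).map netOf)) (fun v => v) with
         | some m => m
         | none => 0) := rfl
    _ = _ := by
        cases hL : (statesB xs).map netOf with
        | nil => rfl
        | cons a t =>
          rw [PySem.List.min?_id_cons, List.foldl_cons]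
          show t.foldl min a = _
          have : omin none a = some a := rfl
          rw [this, foldl_omin_some]


-- ===== VERDICT (by name: the statement is the Claim_ definition above) =====
theorem perket_spec : Claim_equal_perket := by
  intro ingredients _ _
  show perket ingredients = perket_alt ingredients
  rw [perket_eq_foldl_omin, perket_alt_eq_foldl_omin]
  have h1 : (((List.range' 1 (2 ^ ingredients.length - 1)).map (fun k => netOf (pairFn ingredients k)))).Perm
      ((statesB ingredients).map netOf) := by
    have := (main_perm ingredients).map netOf
    simpa [List.map_map, Function.comp] using this
  rw [foldl_omin_perm h1]
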